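-- pv_equiv track=rewrite | github.com/Tulpana/ARC-AGI-2 | arc_agi_2_submission/ril/outline_ops.py | extract_outer_boundary
-- ===== SOURCE A (Python) =====
-- from typing import Dict, List, Optional, Set, Tuple
--
-- Grid = List[List[int]]
--
-- def extract_outer_boundary(grid: Grid) -> Grid:
--     """
--     Extract only the outermost boundary pixels.
--     Returns grid with just the perimeter of the shape.
--     """
--     if not grid or not grid[0]:
--         return grid
--
--     h, w = len(grid), len(grid[0])
--     boundary = [[0] * w for _ in range(h)]
--
--     # Find all non-background pixels
--     filled = {(r, c) for r in range(h) for c in range(w) if grid[r][c] != 0}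
--
--     if not filled:
--         return boundary
--
--     # For each filled pixel, check if it's on the outer edge
--     for r, c in filled:
--         # Check 8-connected neighbors
--         has_background_neighbor = False
--         for dr in [-1, 0, 1]:
--             for dc in [-1, 0, 1]:
--                 if dr == 0 and dc == 0:
--                     continue
--
--                 nr, nc = r + dr, c + dc
--
--                 # Edge of grid counts as background
--                 if nr < 0 or nr >= h or nc < 0 or nc >= w:
--                     has_background_neighbor = True
--                     break
--
--                 if grid[nr][nc] == 0:
--                     has_background_neighbor = True
--                     break
--
--             if has_background_neighbor:
--                 break
--
--         if has_background_neighbor: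
--             boundary[r][c] = grid[r][c]
--
--     return boundary
-- ===== SOURCE B (Python) =====
-- def extract_outer_boundary(grid):
--     """Dilate from the background side: mark any filled cell adjacent to a
--     background cell (including a one-cell frame around the grid)."""
--     if not grid or not grid[0]:
--         return grid
--     h, w = len(grid), len(grid[0])
--     boundary = [[0] * w for _ in range(h)]
--     for r in range(-1, h + 1):
--         for c in range(-1, w + 1):
--             if 0 <= r < h and 0 <= c < w and grid[r][c] != 0:
--                 continue
--             for dr in (-1, 0, 1):
--                 for dc in (-1, 0, 1):
--                     nr, nc = r + dr, c + dc
--                     if 0 <= nr < h and 0 <= nc < w and grid[nr][nc] != 0: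
--                         boundary[nr][nc] = grid[nr][nc]
--     return boundary
-- ===== Notes on version B (the rewrite author's own statement) =====
-- stated objective: alternative
-- what changed: B builds the boundary by dilating from the background side -- it scans every background cell including a one-cell frame around the grid and marks its in-grid nonzero 8-neighbours -- instead of A's erosion test that collects all filled pixels into a set and checks each one for a background neighbour.
import Mathlib
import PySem

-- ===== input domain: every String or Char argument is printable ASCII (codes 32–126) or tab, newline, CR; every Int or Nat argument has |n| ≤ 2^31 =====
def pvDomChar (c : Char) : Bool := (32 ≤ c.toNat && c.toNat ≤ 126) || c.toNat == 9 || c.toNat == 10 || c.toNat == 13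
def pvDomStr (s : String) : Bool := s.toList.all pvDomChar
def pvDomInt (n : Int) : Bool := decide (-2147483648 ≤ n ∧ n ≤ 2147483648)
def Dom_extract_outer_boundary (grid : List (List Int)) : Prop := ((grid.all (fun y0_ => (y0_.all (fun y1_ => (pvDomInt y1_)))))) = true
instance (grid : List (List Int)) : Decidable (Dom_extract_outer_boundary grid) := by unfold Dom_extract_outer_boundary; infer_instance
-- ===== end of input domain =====

-- B extracts the same outer boundary by dilating from the background side (scan background
-- cells incl. a one-cell frame, mark their filled neighbours) instead of testing each filled
-- pixel for a background neighbour; objective: alternative (same asymptotic cost).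

-- shared primitive accessors (grid[r][c] with Python's nonnegative in-range indices; row write)
def pvCellN (g : List (List Int)) (r c : Nat) : Int := (g.getD r []).getD c 0
def pvCellI (g : List (List Int)) (r c : Int) : Int := pvCellN g r.toNat c.toNat
def pvSet2 (b : List (List Int)) (r c : Nat) (v : Int) : List (List Int) :=
  b.modify r (fun row => row.set c v)

-- ===== PORT A =====
-- A's inner double loop with break: "does (r,c) have an 8-neighbour that is outside the grid or 0?"
def pvHasBgA (g : List (List Int)) (h w : Nat) (r c : Nat) : Bool :=
  ([-1, 0, 1] : List Int).any (fun dr => ([-1, 0, 1] : List Int).any (fun dc =>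
    if dr = 0 ∧ dc = 0 then false
    else
      if (r : Int) + dr < 0 ∨ (h : Int) ≤ (r : Int) + dr ∨ (c : Int) + dc < 0 ∨ (w : Int) ≤ (c : Int) + dc then true
      else pvCellI g ((r : Int) + dr) ((c : Int) + dc) == 0))

def extract_outer_boundary (grid : List (List Int)) : List (List Int) :=
  if grid = [] ∨ grid.headD [] = [] then grid
  else
    let h := grid.length
    let w := (grid.headD []).length
    let boundary := List.replicate h (List.replicate w (0 : Int))
    -- the set comprehension {(r,c) | grid[r][c] != 0}, in generation order (write order is immaterial)
    let filled : List (Nat × Nat) := (List.range h).flatMap (fun r =>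
      (List.range w).filterMap (fun c => if pvCellN grid r c ≠ 0 then some (r, c) else none))
    if filled = [] then boundary
    else
      filled.foldl (fun b p =>
        if pvHasBgA grid h w p.1 p.2 then pvSet2 b p.1 p.2 (pvCellN grid p.1 p.2) else b) boundary

-- ===== PORT B =====
-- B's inner double loop: mark every in-grid nonzero 8-neighbour of the background cell (r,c)
def pvMarkFrom (g : List (List Int)) (h w : Nat) (b : List (List Int)) (r c : Int) : List (List Int) :=
  ([-1, 0, 1] : List Int).foldl (fun b dr =>
    ([-1, 0, 1] : List Int).foldl (fun b dc =>
      if 0 ≤ r + dr ∧ r + dr < (h : Int) ∧ 0 ≤ c + dc ∧ c + dc < (w : Int) ∧ pvCellI g (r + dr) (c + dc) ≠ 0 then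
        pvSet2 b (r + dr).toNat (c + dc).toNat (pvCellI g (r + dr) (c + dc))
      else b) b) b

def extract_outer_boundary_alt (grid : List (List Int)) : List (List Int) :=
  if grid = [] ∨ grid.headD [] = [] then grid
  else
    let h := grid.length
    let w := (grid.headD []).length
    let boundary := List.replicate h (List.replicate w (0 : Int))
    (PySem.List.pyRange (-1) ((h : Int) + 1) 1).foldl (fun b r =>
      (PySem.List.pyRange (-1) ((w : Int) + 1) 1).foldl (fun b c =>
        if 0 ≤ r ∧ r < (h : Int) ∧ 0 ≤ c ∧ c < (w : Int) ∧ pvCellI grid r c ≠ 0 then b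
        else pvMarkFrom grid h w b r c) b) boundary

-- ===== PRECONDITION & SPEC =====
-- Pre_ excludes exactly the ragged grids on which Python A raises IndexError: a nonempty first
-- row together with some row shorter than it (the set comprehension indexes grid[r][c] for
-- c < len(grid[0]) in every row).  B raises there too.
def Pre_extract_outer_boundary (grid : List (List Int)) : Prop :=
  grid.headD [] = [] ∨ ∀ row ∈ grid, (grid.headD []).length ≤ row.length
instance (grid : List (List Int)) : Decidable (Pre_extract_outer_boundary grid) := by
  unfold Pre_extract_outer_boundary; infer_instance

def pvWitness_extract_outer_boundary : List (List Int) := [[1, 0], [0, 2]]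

def Spec_extract_outer_boundary (grid : List (List Int)) (out : List (List Int)) : Prop := out = extract_outer_boundary_alt grid
instance (grid : List (List Int)) (out : List (List Int)) : Decidable (Spec_extract_outer_boundary grid out) := by unfold Spec_extract_outer_boundary; infer_instance

-- ===== CLAIM (what is proved, stated in full; the proofs are below) =====
def Claim_equal_extract_outer_boundary : Prop := ∀ (grid : List (List Int)), Dom_extract_outer_boundary grid → Pre_extract_outer_boundary grid → Spec_extract_outer_boundary grid (extract_outer_boundary grid)

-- ===== LEMMAS AND PROOFS =====

theorem pv_len_set2 (b : List (List Int)) (r c : Nat) (v : Int) :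
    (pvSet2 b r c v).length = b.length := List.length_modify ..

theorem pv_rowlen_set2 (b : List (List Int)) (r c : Nat) (v : Int) (i : Nat) :
    ((pvSet2 b r c v).getD i []).length = (b.getD i []).length := by
  simp only [pvSet2, List.getD_eq_getElem?_getD, List.getElem?_modify]
  by_cases hri : r = i
  · subst hri
    cases hb : b[r]? <;> simp
  · simp [hri]

theorem pv_get2_set2 (b : List (List Int)) (r c : Nat) (v : Int) (i j : Nat)
    (hj : j < (b.getD i []).length) :
    pvCellN (pvSet2 b r c v) i j = if r = i ∧ c = j then v else pvCellN b i j := by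
  by_cases hri : r = i
  · subst hri
    cases hb : b[r]? with
    | none =>
      rw [List.getD_eq_getElem?_getD, hb] at hj
      simp at hj
    | some row =>
      have hrow : j < row.length := by
        rw [List.getD_eq_getElem?_getD, hb] at hj; simpa using hj
      simp only [pvCellN, pvSet2, List.getD_eq_getElem?_getD, List.getElem?_modify, hb]
      by_cases hcj : c = j
      · subst hcj
        simp [hrow]
      · simp [List.getElem?_set_ne hcj, hcj]
  · simp [pvCellN, pvSet2, List.getD_eq_getElem?_getD, hri]

/-- It only matters WHICH positions a sequence of `pvSet2` writes touches, when the written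
value is a function of the position alone. -/
theorem pv_fold_len (f : Nat × Nat → Int) (ps : List (Nat × Nat)) (b : List (List Int)) :
    (ps.foldl (fun b p => pvSet2 b p.1 p.2 (f p)) b).length = b.length := by
  induction ps generalizing b with
  | nil => rfl
  | cons p ps ih => simp [List.foldl_cons, ih, pv_len_set2]

theorem pv_fold_rowlen (f : Nat × Nat → Int) (ps : List (Nat × Nat)) (b : List (List Int)) (i : Nat) :
    ((ps.foldl (fun b p => pvSet2 b p.1 p.2 (f p)) b).getD i []).length = (b.getD i []).length := by
  induction ps generalizing b with
  | nil => rfl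
  | cons p ps ih => rw [List.foldl_cons, ih, pv_rowlen_set2]

theorem pv_fold_get2 (f : Nat × Nat → Int) (ps : List (Nat × Nat)) (b : List (List Int)) (i j : Nat)
    (hj : j < (b.getD i []).length) :
    pvCellN (ps.foldl (fun b p => pvSet2 b p.1 p.2 (f p)) b) i j
      = if (i, j) ∈ ps then f (i, j) else pvCellN b i j := by
  induction ps generalizing b with
  | nil => simp
  | cons p ps ih =>
    rw [List.foldl_cons, ih _ (by rw [pv_rowlen_set2]; exact hj),
        pv_get2_set2 _ _ _ _ _ _ hj]
    by_cases hmem : (i, j) ∈ ps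
    · simp [hmem]
    · by_cases hp : p = (i, j)
      · subst hp; simp [hmem]
      · have h1 : ¬(p.1 = i ∧ p.2 = j) := by
          intro ⟨h1, h2⟩; exact hp (Prod.ext h1 h2)
        have h2 : (i, j) ∉ p :: ps := by
          intro hc
          rcases List.mem_cons.mp hc with hc | hc
          · exact hp hc.symm
          · exact hmem hc
        rw [if_neg hmem, if_neg h1, if_neg h2]

theorem pv_foldl_if_filter {α β : Type} (g : β → α → β) (cond : α → Bool) (ps : List α) (b : β) :
    ps.foldl (fun b p => if cond p then g b p else b) b = (ps.filter cond).foldl g b := by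
  induction ps generalizing b with
  | nil => rfl
  | cons p ps ih =>
    by_cases hc : cond p <;> simp [hc, ih]

-- B's write positions from one background cell, as a flat list
def pvWrites (g : List (List Int)) (h w : Nat) (r c : Int) : List (Nat × Nat) :=
  ([-1, 0, 1] : List Int).flatMap (fun dr => ([-1, 0, 1] : List Int).filterMap (fun dc =>
    if 0 ≤ r + dr ∧ r + dr < (h : Int) ∧ 0 ≤ c + dc ∧ c + dc < (w : Int) ∧ pvCellI g (r + dr) (c + dc) ≠ 0
    then some ((r + dr).toNat, (c + dc).toNat) else none))

theorem pv_markFrom_eq (g : List (List Int)) (h w : Nat) (b : List (List Int)) (r c : Int) :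
    pvMarkFrom g h w b r c
      = (pvWrites g h w r c).foldl (fun b p => pvSet2 b p.1 p.2 (pvCellN g p.1 p.2)) b := by
  rw [pvWrites, List.foldl_flatMap]
  unfold pvMarkFrom
  congr 1
  funext b dr
  rw [List.foldl_filterMap]
  congr 1
  funext b dc
  split <;> rename_i hcond
  · rfl
  · rfl

-- B's positions over all background cells (frame included)
def pvLB (g : List (List Int)) (h w : Nat) : List (Nat × Nat) :=
  (PySem.List.pyRange (-1) ((h : Int) + 1) 1).flatMap (fun r =>
    (PySem.List.pyRange (-1) ((w : Int) + 1) 1).flatMap (fun c =>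
      if 0 ≤ r ∧ r < (h : Int) ∧ 0 ≤ c ∧ c < (w : Int) ∧ pvCellI g r c ≠ 0 then []
      else pvWrites g h w r c))

theorem pv_alt_fold_eq (g : List (List Int)) (h w : Nat) (b : List (List Int)) :
    (PySem.List.pyRange (-1) ((h : Int) + 1) 1).foldl (fun b r =>
      (PySem.List.pyRange (-1) ((w : Int) + 1) 1).foldl (fun b c =>
        if 0 ≤ r ∧ r < (h : Int) ∧ 0 ≤ c ∧ c < (w : Int) ∧ pvCellI g r c ≠ 0 then b
        else pvMarkFrom g h w b r c) b) b
      = (pvLB g h w).foldl (fun b p => pvSet2 b p.1 p.2 (pvCellN g p.1 p.2)) b := by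
  rw [pvLB, List.foldl_flatMap]
  congr 1
  funext b r
  rw [List.foldl_flatMap]
  congr 1
  funext b c
  split <;> rename_i hcond
  · rfl
  · exact pv_markFrom_eq g h w b r c

-- membership characterisations
theorem pv_mem_writes (g : List (List Int)) (h w : Nat) (r c : Int) (i j : Nat) :
    (i, j) ∈ pvWrites g h w r c ↔
      ∃ dr ∈ ([-1, 0, 1] : List Int), ∃ dc ∈ ([-1, 0, 1] : List Int),
        (0 ≤ r + dr ∧ r + dr < (h : Int) ∧ 0 ≤ c + dc ∧ c + dc < (w : Int) ∧ pvCellI g (r + dr) (c + dc) ≠ 0)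
        ∧ (r + dr).toNat = i ∧ (c + dc).toNat = j := by
  simp only [pvWrites, List.mem_flatMap, List.mem_filterMap]
  constructor
  · rintro ⟨dr, hdr, dc, hdc, heq⟩
    split at heq
    · rename_i hc
      exact ⟨dr, hdr, dc, hdc, hc, by simpa [Prod.ext_iff] using heq⟩
    · exact absurd heq (by simp)
  · rintro ⟨dr, hdr, dc, hdc, hc, hi, hj⟩
    exact ⟨dr, hdr, dc, hdc, by rw [if_pos hc, hi, hj]⟩

-- the crux: A's per-pixel condition and B's dilation reach exactly the same positions
theorem pv_mem_iff (g : List (List Int)) (h w i j : Nat) (hi : i < h) (hj : j < w) :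
    ((i, j) ∈ ((List.range h).flatMap (fun r =>
        (List.range w).filterMap (fun c => if pvCellN g r c ≠ 0 then some (r, c) else none))).filter
        (fun p => pvHasBgA g h w p.1 p.2)
      ↔ (i, j) ∈ pvLB g h w) := by
  have hcell : pvCellI g (i : Int) (j : Int) = pvCellN g i j := by
    simp [pvCellI]
  constructor
  · intro hmem
    simp only [List.mem_filter, List.mem_flatMap, List.mem_filterMap, List.mem_range] at hmem
    obtain ⟨⟨r, hr, c, hc, heq⟩, hbg⟩ := hmem
    have hnz : pvCellN g i j ≠ 0 := by
      split at heq
      · rename_i hnz0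
        have hrc : r = i ∧ c = j := by simpa [Prod.ext_iff] using heq
        rw [← hrc.1, ← hrc.2]; exact hnz0
      · exact absurd heq (by simp)
    simp only [pvHasBgA, List.any_eq_true] at hbg
    obtain ⟨dr, hdr, dc, hdc, htest⟩ := hbg
    simp only [List.mem_cons, List.not_mem_nil, or_false] at hdr hdc
    -- B's background cell is (i+dr, j+dc); B reaches (i,j) from it with delta (-dr,-dc)
    simp only [pvLB, List.mem_flatMap]
    refine ⟨(i : Int) + dr, ?_, (j : Int) + dc, ?_, ?_⟩
    · rw [PySem.List.mem_pyRange_one]; omega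
    · rw [PySem.List.mem_pyRange_one]; omega
    · have hbgcell : ¬(0 ≤ (i : Int) + dr ∧ (i : Int) + dr < (h : Int) ∧ 0 ≤ (j : Int) + dc ∧ (j : Int) + dc < (w : Int) ∧ pvCellI g ((i : Int) + dr) ((j : Int) + dc) ≠ 0) := by
        split at htest
        · simp at htest
        · rename_i hinr
          split at htest
          · rename_i hout; intro hcontra; omega
          · rename_i hout
            simp only [beq_iff_eq] at htest
            intro hcontra
            exact hcontra.2.2.2.2 htest
      rw [if_neg hbgcell, pv_mem_writes]
      refine ⟨-dr, by simp only [List.mem_cons, List.not_mem_nil, or_false]; omega, -dc,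
              by simp only [List.mem_cons, List.not_mem_nil, or_false]; omega, ?_, by omega, by omega⟩
      have e1 : (i : Int) + dr + -dr = (i : Int) := by ring
      have e2 : (j : Int) + dc + -dc = (j : Int) := by ring
      rw [e1, e2, hcell]
      refine ⟨by omega, by omega, by omega, by omega, hnz⟩
  · intro hmem
    simp only [pvLB, List.mem_flatMap] at hmem
    obtain ⟨r, hr, c, hc, hmem⟩ := hmem
    rw [PySem.List.mem_pyRange_one] at hr hc
    by_cases hfill : 0 ≤ r ∧ r < (h : Int) ∧ 0 ≤ c ∧ c < (w : Int) ∧ pvCellI g r c ≠ 0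
    · rw [if_pos hfill] at hmem; simp at hmem
    · rw [if_neg hfill, pv_mem_writes] at hmem
      obtain ⟨dr, hdr, dc, hdc, ⟨h1, h2, h3, h4, hnz⟩, hi', hj'⟩ := hmem
      simp only [List.mem_cons, List.not_mem_nil, or_false] at hdr hdc
      have hri : r + dr = (i : Int) := by omega
      have hcj : c + dc = (j : Int) := by omega
      rw [hri, hcj, hcell] at hnz
      simp only [List.mem_filter, List.mem_flatMap, List.mem_filterMap, List.mem_range]
      refine ⟨⟨i, hi, j, hj, by rw [if_pos hnz]⟩, ?_⟩
      -- A sees the background cell (r,c) = (i-dr, j-dc) as neighbour with delta (-dr,-dc)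
      simp only [pvHasBgA, List.any_eq_true]
      refine ⟨-dr, by simp only [List.mem_cons, List.not_mem_nil, or_false]; omega, -dc,
              by simp only [List.mem_cons, List.not_mem_nil, or_false]; omega, ?_⟩
      have e1 : (i : Int) + -dr = r := by omega
      have e2 : (j : Int) + -dc = c := by omega
      have hne00 : ¬(-dr = 0 ∧ -dc = 0) := by
        rintro ⟨hz1, hz2⟩
        apply hfill
        have hr' : r = (i : Int) := by omega
        have hc' : c = (j : Int) := by omega
        rw [hr', hc', hcell]
        exact ⟨by omega, by omega, by omega, by omega, hnz⟩
      rw [if_neg hne00, e1, e2]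
      by_cases hout : r < 0 ∨ (h : Int) ≤ r ∨ c < 0 ∨ (w : Int) ≤ c
      · rw [if_pos hout]
      · rw [if_neg hout]
        simp only [beq_iff_eq]
        by_contra hne
        exact hfill ⟨by omega, by omega, by omega, by omega, hne⟩

theorem pv_eq_of_shape_get2 (a b : List (List Int)) (h w : Nat)
    (ha : a.length = h) (hb : b.length = h)
    (har : ∀ i < h, (a.getD i []).length = w) (hbr : ∀ i < h, (b.getD i []).length = w)
    (he : ∀ i < h, ∀ j < w, pvCellN a i j = pvCellN b i j) : a = b := by
  apply List.ext_getElem (by omega)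
  intro i hia hib
  have hih : i < h := by omega
  apply List.ext_getElem
  · have h1 := har i hih; have h2 := hbr i hih
    rw [List.getD_eq_getElem?_getD, List.getElem?_eq_getElem hia] at h1
    rw [List.getD_eq_getElem?_getD, List.getElem?_eq_getElem hib] at h2
    simp at h1 h2; omega
  · intro j hja hjb
    have hjw : j < w := by
      have h1 := har i hih
      rw [List.getD_eq_getElem?_getD, List.getElem?_eq_getElem hia] at h1
      simp at h1; omega
    have := he i hih j hjw
    simp only [pvCellN, List.getD_eq_getElem?_getD, List.getElem?_eq_getElem hia,
      List.getElem?_eq_getElem hib, Option.getD_some] at this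
    simpa [List.getElem?_eq_getElem, hja, hjb] using this

-- ===== VERDICT (by name: the statement is the Claim_ definition above) =====
theorem extract_outer_boundary_spec : Claim_equal_extract_outer_boundary := by
  intro grid _ _
  unfold Spec_extract_outer_boundary extract_outer_boundary extract_outer_boundary_alt
  by_cases htriv : grid = [] ∨ grid.headD [] = []
  · rw [if_pos htriv, if_pos htriv]
  · rw [if_neg htriv, if_neg htriv]
    set h := grid.length with hh
    set w := (grid.headD []).length with hw
    set boundary := List.replicate h (List.replicate w (0 : Int)) with hbdef
    set filled : List (Nat × Nat) := (List.range h).flatMap (fun r =>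
      (List.range w).filterMap (fun c => if pvCellN grid r c ≠ 0 then some (r, c) else none)) with hfdef
    have hblen : boundary.length = h := by simp [hbdef]
    have hbrow : ∀ i < h, (boundary.getD i []).length = w := by
      intro i hih
      simp [hbdef, List.getD_eq_getElem?_getD, hih]
    have hbget : ∀ i < h, ∀ j < w, pvCellN boundary i j = 0 := by
      intro i hih j hjw
      simp [pvCellN, hbdef, List.getD_eq_getElem?_getD, hih, hjw]
    set f : Nat × Nat → Int := fun p => pvCellN grid p.1 p.2 with hfval
    -- characterise B's result
    rw [pv_alt_fold_eq]
    have hBlen := pv_fold_len f (pvLB grid h w) boundary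
    have hBrow := pv_fold_rowlen f (pvLB grid h w) boundary
    have hBget : ∀ i < h, ∀ j < w,
        pvCellN ((pvLB grid h w).foldl (fun b p => pvSet2 b p.1 p.2 (f p)) boundary) i j
          = if (i, j) ∈ pvLB grid h w then f (i, j) else 0 := by
      intro i hih j hjw
      rw [pv_fold_get2 f _ _ i j (by rw [hbrow i hih]; exact hjw), hbget i hih j hjw]
    -- characterise A's result (both branches of `if filled = []`)
    by_cases hfe : filled = []
    · rw [if_pos hfe]
      apply pv_eq_of_shape_get2 _ _ h w hblen (by rw [hBlen]; exact hblen)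
        hbrow (fun i hih => by rw [hBrow]; exact hbrow i hih)
      intro i hih j hjw
      rw [hbget i hih j hjw, hBget i hih j hjw]
      have hnot : (i, j) ∉ pvLB grid h w := by
        intro hm
        have hA := (pv_mem_iff grid h w i j hih hjw).mpr hm
        rw [← hfdef, hfe] at hA
        simp at hA
      rw [if_neg hnot]
    · rw [if_neg hfe]
      rw [pv_foldl_if_filter (fun b p => pvSet2 b p.1 p.2 (f p)) (fun p => pvHasBgA grid h w p.1 p.2)]
      have hAlen := pv_fold_len f (filled.filter fun p => pvHasBgA grid h w p.1 p.2) boundary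
      apply pv_eq_of_shape_get2 _ _ h w (by rw [hAlen]; exact hblen) (by rw [hBlen]; exact hblen)
        (fun i hih => by rw [pv_fold_rowlen]; exact hbrow i hih)
        (fun i hih => by rw [hBrow]; exact hbrow i hih)
      intro i hih j hjw
      rw [pv_fold_get2 f _ _ i j (by rw [hbrow i hih]; exact hjw), hbget i hih j hjw,
          hBget i hih j hjw]
      exact if_congr (pv_mem_iff grid h w i j hih hjw) rfl rfl
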